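-- pv_equiv track=rewrite | github.com/Wwstarry/Introduction-to-Information-Security | multi_brute_force.py | divide_task_16bit
-- ===== SOURCE A (Python) =====
-- def divide_task_16bit(num_segments, mode='s-aes'):
--     if mode.lower() == 's-aes':
--         start = 0
--         end = 2**16 -1  # 16-bit key
--     elif mode.lower() == 's-des':
--         start = 0
--         end = 2**10 -1  # 10-bit key
--     else:
--         raise ValueError(f"Unsupported mode: {mode}")
--
--     if num_segments <= 0:
--         return []
--     segment_size = (end - start +1) // num_segments
--     segments = []
--     current_start = start
--     for i in range(num_segments):
--         current_end = current_start + segment_size -1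
--         if i == num_segments -1:
--             current_end = end  # 最后一个段到达范围末端
--         segments.append((current_start, current_end))
--         current_start = current_end +1
--     return segments
-- ===== SOURCE B (Python) =====
-- def divide_task_16bit(num_segments, mode='s-aes'):
--     m = mode.lower()
--     if m == 's-aes':
--         end = 2**16 - 1
--     elif m == 's-des':
--         end = 2**10 - 1
--     else:
--         raise ValueError(f"Unsupported mode: {mode}")
--     if num_segments <= 0:
--         return []
--     seg = (end + 1) // num_segments
--
--     def split(s, e, n):
--         # n segments covering [s, e]; boundaries are multiples of seg from s
--         if n == 1:
--             return [(s, e)]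
--         n1 = n // 2
--         mid = s + n1 * seg
--         return split(s, mid - 1, n1) + split(mid, e, n - n1)
--
--     return split(0, end, num_segments)
-- ===== Notes on version B (the rewrite author's own statement) =====
-- stated objective: alternative
-- what changed: Replaces A's single left-to-right loop threading a mutated current_start with a divide-and-conquer recursion that halves the segment count, computes the midpoint boundary arithmetically, and concatenates the two recursively built halves; only the path to the last leaf carries the clamped end.
import Mathlib
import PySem

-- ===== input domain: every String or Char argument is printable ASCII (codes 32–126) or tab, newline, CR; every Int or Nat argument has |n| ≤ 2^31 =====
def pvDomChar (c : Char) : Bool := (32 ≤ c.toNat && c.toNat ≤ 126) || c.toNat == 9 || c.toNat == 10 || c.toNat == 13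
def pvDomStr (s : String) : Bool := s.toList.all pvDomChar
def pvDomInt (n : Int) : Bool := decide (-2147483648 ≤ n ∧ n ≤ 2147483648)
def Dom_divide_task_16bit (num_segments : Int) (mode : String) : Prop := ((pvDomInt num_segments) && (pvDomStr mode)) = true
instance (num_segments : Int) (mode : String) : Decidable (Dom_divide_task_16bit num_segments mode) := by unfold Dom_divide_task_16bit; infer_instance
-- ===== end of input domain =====

-- B replaces A's accumulator loop by a divide-and-conquer recursion halving the
-- segment count and concatenating the halves (objective: alternative).

-- ===== PORT A =====
-- the for-loop of A: state is (current_start, segments); range(num_segments)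
def divideA_loop (num_segments start e : Int) : List (Int × Int) :=
  let segment_size := PySem.Int.floordiv (e - start + 1) num_segments
  ((PySem.List.pyRange 0 num_segments 1).foldl
    (fun (st : Int × List (Int × Int)) i =>
      let current_end := if i == num_segments - 1 then e else st.1 + segment_size - 1
      (current_end + 1, st.2 ++ [(st.1, current_end)]))
    (start, [])).2

def divide_task_16bit (num_segments : Int) (mode : String) : List (Int × Int) :=
  if PySem.Str.lower mode == "s-aes" then
    (if num_segments ≤ 0 then [] else divideA_loop num_segments 0 (2^16 - 1))
  else if PySem.Str.lower mode == "s-des" then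
    (if num_segments ≤ 0 then [] else divideA_loop num_segments 0 (2^10 - 1))
  else []  -- Python raises ValueError here; excluded by Pre_

-- ===== PORT B =====
-- B's recursive split(s, e, n); Python recurses on positive int n, ported as
-- Nat with the n == 1 base case written as n ≤ 1 to make the recursion total
-- (n = 0 is never reached: divideB_core only calls it with n ≥ 1).
def splitB (seg : Int) (s e : Int) (n : Nat) : List (Int × Int) :=
  if _h : n ≤ 1 then [(s, e)]
  else
    let n1 := n / 2
    let mid := s + (n1 : Int) * seg
    splitB seg s (mid - 1) n1 ++ splitB seg mid e (n - n1)
termination_by n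
decreasing_by all_goals omega

def divideB_core (num_segments e : Int) : List (Int × Int) :=
  if num_segments ≤ 0 then []
  else
    let seg := PySem.Int.floordiv (e + 1) num_segments
    splitB seg 0 e num_segments.toNat

def divide_task_16bit_alt (num_segments : Int) (mode : String) : List (Int × Int) :=
  if PySem.Str.lower mode == "s-aes" then divideB_core num_segments (2^16 - 1)
  else if PySem.Str.lower mode == "s-des" then divideB_core num_segments (2^10 - 1)
  else []  -- Python raises ValueError here; excluded by Pre_

-- ===== PRECONDITION & SPEC =====
-- Pre_ excludes exactly the modes on which A raises ValueError.
def Pre_divide_task_16bit (num_segments : Int) (mode : String) : Prop :=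
  PySem.Str.lower mode = "s-aes" ∨ PySem.Str.lower mode = "s-des"
instance (num_segments : Int) (mode : String) : Decidable (Pre_divide_task_16bit num_segments mode) := by unfold Pre_divide_task_16bit; infer_instance

def pvWitness_divide_task_16bit : Int × String := (4, "s-aes")

def Spec_divide_task_16bit (num_segments : Int) (mode : String) (out : List (Int × Int)) : Prop := out = divide_task_16bit_alt num_segments mode
instance (num_segments : Int) (mode : String) (out : List (Int × Int)) : Decidable (Spec_divide_task_16bit num_segments mode out) := by unfold Spec_divide_task_16bit; infer_instance

-- ===== CLAIM (what is proved, stated in full; the proofs are below) =====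
def Claim_equal_divide_task_16bit : Prop := ∀ (num_segments : Int) (mode : String), Dom_divide_task_16bit num_segments mode → Pre_divide_task_16bit num_segments mode → Spec_divide_task_16bit num_segments mode (divide_task_16bit num_segments mode)

-- ===== LEMMAS AND PROOFS =====

-- A-side loop invariant: starting the fold at index a with current_start = a*seg
-- yields the index-formula segments for the remaining range.
lemma foldl_seg (e seg n : Int) :
    ∀ (k : Nat) (a : Int) (acc : List (Int × Int)), (n - a).toNat = k → 0 ≤ a →
    ((PySem.List.pyRange a n 1).foldl
      (fun (st : Int × List (Int × Int)) i =>
        let ce := if i == n - 1 then e else st.1 + seg - 1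
        (ce + 1, st.2 ++ [(st.1, ce)]))
      (a * seg, acc)).2
    = acc ++ (PySem.List.pyRange a n 1).map
        (fun i => (i * seg, if i == n - 1 then e else (i + 1) * seg - 1)) := by
  intro k
  induction k with
  | zero =>
    intro a acc hk _
    have hna : n ≤ a := by omega
    rw [PySem.List.pyRange_one_eq_nil hna]
    simp
  | succ k ih =>
    intro a acc hk ha
    have han : a < n := by omega
    rw [PySem.List.pyRange_one_cons han]
    simp only [List.foldl_cons, List.map_cons]
    by_cases hlast : a = n - 1
    · have : n ≤ a + 1 := by omega
      rw [PySem.List.pyRange_one_eq_nil this]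
      simp [hlast]
    · have hbeq : (a == n - 1) = false := by simp [hlast]
      have hstep : a * seg + seg - 1 + 1 = (a + 1) * seg := by ring
      have hend : a * seg + seg - 1 = (a + 1) * seg - 1 := by ring
      simp only [hbeq, Bool.false_eq_true, if_false]
      rw [hstep, hend,
        ih (a + 1) (acc ++ [(a * seg, (a + 1) * seg - 1)]) (by omega) (by omega)]
      simp

-- B-side characterisation: splitB produces the index-formula segments.
lemma splitB_char (seg : Int) :
    ∀ (n : Nat), 1 ≤ n → ∀ (s e : Int),
    splitB seg s e n
    = (List.range n).map
        (fun (k : Nat) => (s + (k : Int) * seg,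
                   if k = n - 1 then e else s + ((k : Int) + 1) * seg - 1)) := by
  intro n
  induction n using Nat.strong_induction_on with
  | _ n ih =>
    intro hn s e
    by_cases h1 : n ≤ 1
    · have hn1 : n = 1 := by omega
      subst hn1
      rw [splitB]
      simp
    · rw [splitB]
      simp only [h1, dite_false]
      have hn1 : 1 ≤ n / 2 := by omega
      have hn2 : 1 ≤ n - n / 2 := by omega
      rw [ih (n / 2) (by omega) hn1, ih (n - n / 2) (by omega) hn2]
      have hsplit : n = n / 2 + (n - n / 2) := by omega
      rw [show List.range n = List.range (n / 2 + (n - n / 2)) by rw [← hsplit],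
        List.range_add, List.map_append]
      congr 1
      · apply List.map_congr_left
        intro k hk
        rw [List.mem_range] at hk
        have hne : k ≠ n - 1 := by omega
        rw [if_neg hne]
        by_cases hke : k = n / 2 - 1
        · rw [if_pos hke]
          have hc : ((n / 2 : Nat) : Int) = (k : Int) + 1 := by omega
          rw [hc]
        · rw [if_neg hke]
      · rw [List.map_map]
        apply List.map_congr_left
        intro k hk
        rw [List.mem_range] at hk
        simp only [Function.comp_apply]
        have hcast : ((n / 2 + k : Nat) : Int) = ((n / 2 : Nat) : Int) + (k : Int) := by
          push_cast; ring
        by_cases hke : k = n - n / 2 - 1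
        · rw [if_pos hke, if_pos (show n / 2 + k = n - 1 by omega)]
          simp only [Prod.mk.injEq]
          exact ⟨by rw [hcast]; ring, trivial⟩
        · rw [if_neg hke, if_neg (show ¬ n / 2 + k = n - 1 by omega)]
          simp only [Prod.mk.injEq]
          exact ⟨by rw [hcast]; ring, by rw [hcast]; ring⟩

lemma divideA_eq_B (n e : Int) (hn : ¬ n ≤ 0) :
    divideA_loop n 0 e = divideB_core n e := by
  unfold divideA_loop divideB_core
  simp only [hn, if_false]
  have h0 : e - 0 + 1 = e + 1 := by ring
  rw [h0]
  set seg := PySem.Int.floordiv (e + 1) n with hseg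
  have hA := foldl_seg e seg n (n - 0).toNat 0 [] rfl le_rfl
  simp only [zero_mul, List.nil_append] at hA
  rw [hA, splitB_char seg n.toNat (by omega) 0 e,
    PySem.List.pyRange_one 0 n, List.map_map]
  simp only [sub_zero]
  apply List.map_congr_left
  intro k hk
  rw [List.mem_range] at hk
  simp only [Function.comp_apply]
  by_cases hke : k = n.toNat - 1
  · have hb : ((0 + (k : Int)) == n - 1) = true := by
      simp only [beq_iff_eq]; omega
    simp only [hb, if_true, if_pos hke]
    simp only [Prod.mk.injEq]
    exact ⟨by ring, trivial⟩
  · have hb : ((0 + (k : Int)) == n - 1) = false := by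
      simp only [beq_eq_false_iff_ne, ne_eq]; omega
    simp only [hb, Bool.false_eq_true, if_false, if_neg hke]
    simp only [Prod.mk.injEq]
    exact ⟨by ring, by ring⟩

-- ===== VERDICT (by name: the statement is the Claim_ definition above) =====
theorem divide_task_16bit_spec : Claim_equal_divide_task_16bit := by
  intro n mode _ hpre
  unfold Spec_divide_task_16bit divide_task_16bit divide_task_16bit_alt
  rcases hpre with h | h <;> rw [h] <;> simp only [beq_self_eq_true, if_true]
  · by_cases hn : n ≤ 0
    · simp [hn, divideB_core]
    · simp only [hn, if_false]
      exact divideA_eq_B n _ hn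
  · by_cases hn : n ≤ 0
    · simp [hn, divideB_core]
    · simp only [hn, if_false]
      exact divideA_eq_B n _ hn
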